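-- pv_equiv track=rewrite | github.com/timptner/advent-of-code-legacy | year2023/day15.py | part1
-- ===== SOURCE A (Python) =====
-- ASCII = {chr(n): n for n in range(32, 127)}
--
-- def part1(text: str) -> int:
--     items = text.replace('\n', '').split(',')
--     numbers = []
--     for item in items:
--         chars = list(item)
--         number = 0
--         for char in chars:
--             number = (number + ASCII[char]) * 17 % 256
--         numbers.append(number)
--     return sum(numbers)
-- ===== SOURCE B (Python) =====
-- ASCII = {chr(n): n for n in range(32, 127)}
--
-- def part1(text: str) -> int:
--     total = 0
--     cur = 0
--     for char in text:
--         if char == '\n':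
--             continue
--         if char == ',':
--             total += cur
--             cur = 0
--         else:
--             cur = (cur + ASCII[char]) * 17 % 256
--     return total + cur
-- ===== Notes on version B (the rewrite author's own statement) =====
-- stated objective: simpler
-- what changed: Replaced replace-then-split-then-nested-loops with a single scan over the raw text keeping a current-group hash and a running total, resetting on ',' and skipping '\n'.
import Mathlib
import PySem

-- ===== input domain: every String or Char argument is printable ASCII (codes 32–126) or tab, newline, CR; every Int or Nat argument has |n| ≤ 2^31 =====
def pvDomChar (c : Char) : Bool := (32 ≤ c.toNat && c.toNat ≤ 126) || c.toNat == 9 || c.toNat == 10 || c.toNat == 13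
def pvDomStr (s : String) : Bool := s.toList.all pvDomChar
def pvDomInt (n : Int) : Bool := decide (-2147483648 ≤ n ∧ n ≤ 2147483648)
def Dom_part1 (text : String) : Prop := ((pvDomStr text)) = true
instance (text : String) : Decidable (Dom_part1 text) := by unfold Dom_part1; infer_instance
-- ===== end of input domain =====

-- B is simpler: one scan with a reset-on-',' accumulator instead of replace + split + nested loops.

-- ===== PORT A =====
-- ASCII[c] for a char in the dict's domain chr(32)..chr(126) is its code point; exact under Pre_part1,
-- which excludes the chars on which the dict lookup raises KeyError.
def pvAsciiVal (c : Char) : Int := (c.toNat : Int)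

def part1 (text : String) : Int :=
  -- items = text.replace('\n', '').split(',')
  let items := PySem.Chars.splitOn (PySem.Chars.replace text.toList ['\n'] []) [',']
  -- numbers built by appending each item's hash
  let numbers := items.foldl (fun acc item =>
    acc ++ [item.foldl (fun number char => PySem.Int.mod ((number + pvAsciiVal char) * 17) 256) 0]) []
  numbers.sum

-- ===== PORT B =====
def part1_alt (text : String) : Int :=
  let st := text.toList.foldl (fun (p : Int × Int) c =>
    if c = '\n' then p
    else if c = ',' then (0, p.2 + p.1)
    else (PySem.Int.mod ((p.1 + pvAsciiVal c) * 17) 256, p.2)) (0, 0)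
  st.2 + st.1

-- ===== PRECONDITION & SPEC =====
-- Pre_ excludes exactly the strings on which both Pythons raise KeyError: a char that is neither
-- printable ASCII (code 32..126) nor '\n' is looked up in the ASCII dict and is absent.
def Pre_part1 (text : String) : Prop :=
  text.toList.all (fun c => (32 ≤ c.toNat && c.toNat ≤ 126) || c == '\n') = true
instance (text : String) : Decidable (Pre_part1 text) := by unfold Pre_part1; infer_instance

def pvWitness_part1 : String := "ab,c"

def Spec_part1 (text : String) (out : Int) : Prop := out = part1_alt text
instance (text : String) (out : Int) : Decidable (Spec_part1 text out) := by unfold Spec_part1; infer_instance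

-- ===== CLAIM (what is proved, stated in full; the proofs are below) =====
def Claim_equal_part1 : Prop := ∀ (text : String), Dom_part1 text → Pre_part1 text → Spec_part1 text (part1 text)

-- ===== LEMMAS AND PROOFS =====

-- the per-character hash step
def pvH (n : Int) (c : Char) : Int := PySem.Int.mod ((n + pvAsciiVal c) * 17) 256

-- structural version of split on a single comma
def pvSplit : List Char → List (List Char)
  | [] => [[]]
  | c :: t => if c = ',' then [] :: pvSplit t
              else match pvSplit t with
                   | [] => [[c]]
                   | g :: gs => (c :: g) :: gs

theorem pvSplit_ne_nil (cs : List Char) : pvSplit cs ≠ [] := by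
  cases cs with
  | nil => simp [pvSplit]
  | cons c t =>
    simp only [pvSplit]
    split
    · simp
    · split <;> simp

theorem pvSplit_comma (t : List Char) : pvSplit (',' :: t) = [] :: pvSplit t := by
  simp [pvSplit]

theorem pvSplit_cons (c : Char) (t g : List Char) (gs : List (List Char)) (hc : ¬ c = ',')
    (hsp : pvSplit t = g :: gs) : pvSplit (c :: t) = (c :: g) :: gs := by
  simp [pvSplit, hc, hsp]

-- replace.go with pattern '\n' and empty replacement is filter
theorem pvReplace_go (fuel : Nat) (l acc : List Char) (h : l.length ≤ fuel) :
    PySem.Chars.replace.go ['\n'] [] fuel l acc = acc.reverse ++ l.filter (· ≠ '\n') := by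
  induction fuel generalizing l acc with
  | zero =>
    cases l with
    | nil => simp [PySem.Chars.replace.go]
    | cons c t => simp at h
  | succ fuel ih =>
    cases l with
    | nil =>
      rw [show PySem.Chars.replace.go ['\n'] [] (fuel + 1) [] acc = acc.reverse from rfl]
      simp
    | cons c t =>
      by_cases hc : c = '\n'
      · subst hc
        rw [show PySem.Chars.replace.go ['\n'] [] (fuel + 1) ('\n' :: t) acc
              = PySem.Chars.replace.go ['\n'] [] fuel t acc from rfl]
        rw [ih t acc (by simpa using Nat.le_of_succ_le_succ h)]
        simp [List.filter]
      · have hbe : ('\n' == c) = false := by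
          simp only [beq_eq_false_iff_ne, ne_eq]; exact fun h' => hc h'.symm
        rw [show PySem.Chars.replace.go ['\n'] [] (fuel + 1) (c :: t) acc
              = if List.isPrefixOf ['\n'] (c :: t)
                then PySem.Chars.replace.go ['\n'] [] fuel t ([].reverse ++ acc)
                else PySem.Chars.replace.go ['\n'] [] fuel t (c :: acc) from rfl]
        rw [if_neg (by simp [List.isPrefixOf, hbe])]
        rw [ih t (c :: acc) (by simpa using Nat.le_of_succ_le_succ h)]
        simp [List.filter, hc]

theorem pvReplace_eq_filter (cs : List Char) :
    PySem.Chars.replace cs ['\n'] [] = cs.filter (· ≠ '\n') := by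
  show PySem.Chars.replace.go ['\n'] [] cs.length cs [] = _
  simpa using pvReplace_go cs.length cs [] (le_refl _)

-- splitOn.go by the singleton separator ',' is pvSplit, up to the accumulated prefix
theorem pvSplitOn_go (fuel : Nat) (l cur : List Char) (acc : List (List Char))
    (h : l.length ≤ fuel) :
    PySem.Chars.splitOn.go [','] fuel l cur acc =
      acc.reverse ++ ((cur.reverse ++ (pvSplit l).headI) :: (pvSplit l).tail) := by
  induction fuel generalizing l cur acc with
  | zero =>
    cases l with
    | nil => simp [PySem.Chars.splitOn.go, pvSplit]
    | cons c t => simp at h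
  | succ fuel ih =>
    cases l with
    | nil =>
      rw [show PySem.Chars.splitOn.go [','] (fuel + 1) [] cur acc
            = (cur.reverse :: acc).reverse from rfl]
      simp [pvSplit]
    | cons c t =>
      by_cases hc : c = ','
      · subst hc
        rw [show PySem.Chars.splitOn.go [','] (fuel + 1) (',' :: t) cur acc
              = PySem.Chars.splitOn.go [','] fuel t [] (cur.reverse :: acc) from rfl]
        rw [ih t [] (cur.reverse :: acc) (by simpa using Nat.le_of_succ_le_succ h)]
        rcases hsp : pvSplit t with _ | ⟨g, gs⟩
        · exact absurd hsp (pvSplit_ne_nil t)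
        · simp [pvSplit_comma, hsp]
      · have hbe : (',' == c) = false := by
          simp only [beq_eq_false_iff_ne, ne_eq]; exact fun h' => hc h'.symm
        rw [show PySem.Chars.splitOn.go [','] (fuel + 1) (c :: t) cur acc
              = if List.isPrefixOf [','] (c :: t)
                then PySem.Chars.splitOn.go [','] fuel t [] (cur.reverse :: acc)
                else PySem.Chars.splitOn.go [','] fuel t (c :: cur) acc from rfl]
        rw [if_neg (by simp [List.isPrefixOf, hbe])]
        rw [ih t (c :: cur) acc (by simpa using Nat.le_of_succ_le_succ h)]
        rcases hsp : pvSplit t with _ | ⟨g, gs⟩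
        · exact absurd hsp (pvSplit_ne_nil t)
        · rw [pvSplit_cons c t g gs hc hsp]
          simp

theorem pvSplitOn_eq_pvSplit (cs : List Char) :
    PySem.Chars.splitOn cs [','] = pvSplit cs := by
  show PySem.Chars.splitOn.go [','] (cs.length + 1) cs [] [] = _
  rw [pvSplitOn_go (cs.length + 1) cs [] [] (by omega)]
  rcases hsp : pvSplit cs with _ | ⟨g, gs⟩
  · exact absurd hsp (pvSplit_ne_nil cs)
  · simp

-- sum of the group hashes, the first group continued from cur
def pvGroupsSum (cur : Int) : List (List Char) → Int
  | [] => cur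
  | g :: gs => g.foldl pvH cur + (gs.map (fun g => g.foldl pvH 0)).sum

theorem pvGroupsSum_cons (cur : Int) (g : List Char) (gs : List (List Char)) :
    pvGroupsSum cur (g :: gs) = g.foldl pvH cur + (gs.map (fun g => g.foldl pvH 0)).sum := rfl

theorem pvGroupsSum_zero (L : List (List Char)) (hL : L ≠ []) :
    pvGroupsSum 0 L = (L.map (fun g => g.foldl pvH 0)).sum := by
  cases L with
  | nil => exact absurd rfl hL
  | cons g gs => simp [pvGroupsSum_cons]

-- the single-scan loop computes tot + the sum of group hashes of the '\n'-free text
theorem pvScan_eq (cs : List Char) (cur tot : Int) :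
    (cs.foldl (fun (p : Int × Int) c =>
        if c = '\n' then p
        else if c = ',' then (0, p.2 + p.1)
        else (PySem.Int.mod ((p.1 + pvAsciiVal c) * 17) 256, p.2)) (cur, tot)).2 +
    (cs.foldl (fun (p : Int × Int) c =>
        if c = '\n' then p
        else if c = ',' then (0, p.2 + p.1)
        else (PySem.Int.mod ((p.1 + pvAsciiVal c) * 17) 256, p.2)) (cur, tot)).1 =
      tot + pvGroupsSum cur (pvSplit (cs.filter (· ≠ '\n'))) := by
  induction cs generalizing cur tot with
  | nil => simp [pvGroupsSum, pvSplit]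
  | cons c t ih =>
    by_cases hn : c = '\n'
    · subst hn
      simpa [List.filter] using ih cur tot
    · by_cases hcm : c = ','
      · subst hcm
        rw [List.foldl_cons, if_neg (by decide : ¬(',' = '\n')), if_pos rfl]
        rw [ih 0 (tot + cur)]
        have hf : (',' :: t).filter (· ≠ '\n') = ',' :: t.filter (· ≠ '\n') := by simp
        rw [hf, pvSplit_comma, pvGroupsSum_cons,
          pvGroupsSum_zero _ (pvSplit_ne_nil _), List.foldl_nil]
        ring
      · rw [List.foldl_cons, if_neg hn, if_neg hcm]
        rw [ih (PySem.Int.mod ((cur + pvAsciiVal c) * 17) 256) tot]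
        have hf : (c :: t).filter (· ≠ '\n') = c :: t.filter (· ≠ '\n') := by simp [hn]
        rw [hf]
        rcases hsp : pvSplit (t.filter (· ≠ '\n')) with _ | ⟨g, gs⟩
        · exact absurd hsp (pvSplit_ne_nil _)
        · rw [pvSplit_cons c _ g gs hcm hsp, pvGroupsSum_cons, pvGroupsSum_cons,
            List.foldl_cons]
          rfl

-- ===== VERDICT (by name: the statement is the Claim_ definition above) =====
theorem part1_spec : Claim_equal_part1 := by
  intro text _ _
  show part1 text = part1_alt text
  simp only [part1, part1_alt]
  rw [pvReplace_eq_filter, pvSplitOn_eq_pvSplit]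
  rw [PySem.List.foldl_append_singleton_eq_map]
  rw [pvScan_eq text.toList 0 0]
  rw [show (List.foldl (fun number char => PySem.Int.mod ((number + pvAsciiVal char) * 17) 256) 0)
      = (fun g : List Char => g.foldl pvH 0) from rfl]
  rw [pvGroupsSum_zero _ (pvSplit_ne_nil _)]
  simp
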